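-- pv_equiv track=rewrite | github.com/thanhnndev/C401-D5-Lecture-Day-08-09-10 | server/services/runner.py | _token_deltas
-- ===== SOURCE A (Python) =====
-- def _token_deltas(answer: str) -> list[str]:
--     if not answer:
--         return ["\n"]
--     parts: list[str] = []
--     words = answer.split(" ")
--     for i, w in enumerate(words):
--         parts.append((" " if i > 0 else "") + w)
--     return parts if parts else [answer]
-- ===== SOURCE B (Python) =====
-- def _token_deltas(answer: str) -> list[str]:
--     if not answer:
--         return ["\n"]
--     parts: list[str] = [""]
--     for c in answer:
--         if c == " ":
--             parts.append(" ")
--         else: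
--             parts[-1] += c
--     return parts
-- ===== Notes on version B (the rewrite author's own statement) =====
-- stated objective: simpler
-- what changed: Replaces split-then-reassemble (split on the space separator, then an enumerate loop re-prefixing each word) with a single character-level scan that starts a new space-prefixed piece at each space, dropping the dead empty-list fallback.
import Mathlib
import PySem

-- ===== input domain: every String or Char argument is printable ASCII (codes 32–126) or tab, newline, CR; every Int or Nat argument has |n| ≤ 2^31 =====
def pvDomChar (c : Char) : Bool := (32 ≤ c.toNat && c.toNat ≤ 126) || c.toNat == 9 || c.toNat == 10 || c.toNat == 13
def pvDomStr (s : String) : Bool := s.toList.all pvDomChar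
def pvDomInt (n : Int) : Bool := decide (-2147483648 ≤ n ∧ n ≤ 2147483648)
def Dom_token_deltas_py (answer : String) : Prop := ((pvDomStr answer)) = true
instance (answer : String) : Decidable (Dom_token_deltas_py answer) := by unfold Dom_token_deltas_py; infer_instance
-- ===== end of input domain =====

-- B replaces A's split-then-reassemble with a single character scan that starts a new
-- " "-prefixed piece at each space (objective: simpler; same return value everywhere).

-- ===== PORT A =====
def token_deltas_py (answer : String) : List String :=
  if answer = "" then ["\n"]
  else
    let words : List String := (PySem.Str.split? answer " ").getD []
    let parts : List String :=
      (PySem.List.enumerate words).foldl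
        (fun parts iw => parts ++ [(if iw.1 > 0 then " " else "") ++ iw.2]) []
    if parts.isEmpty then [answer] else parts

-- ===== PORT B =====
def token_deltas_py_alt (answer : String) : List String :=
  if answer = "" then ["\n"]
  else
    answer.toList.foldl
      (fun parts c =>
        if c = ' ' then parts ++ [" "]
        else parts.dropLast ++ [parts.getLast! ++ c.toString])
      [""]

-- ===== PRECONDITION & SPEC =====
def Spec_token_deltas_py (answer : String) (out : List String) : Prop := out = token_deltas_py_alt answer
instance (answer : String) (out : List String) : Decidable (Spec_token_deltas_py answer out) := by unfold Spec_token_deltas_py; infer_instance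

-- ===== CLAIM (what is proved, stated in full; the proofs are below) =====
def Claim_equal_token_deltas_py : Prop := ∀ (answer : String), Dom_token_deltas_py answer → Spec_token_deltas_py answer (token_deltas_py answer)

-- ===== LEMMAS AND PROOFS =====

/-- Reference split on a single space: tokens between spaces (CPython `s.split(" ")`). -/
def pvSp : List Char → List (List Char)
  | [] => [[]]
  | c :: rest =>
    if c = ' ' then [] :: pvSp rest
    else
      match pvSp rest with
      | [] => [[c]]
      | w :: ws => (c :: w) :: ws

theorem pvSp_ne_nil (cs : List Char) : pvSp cs ≠ [] := by
  cases cs with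
  | nil => simp [pvSp]
  | cons c rest =>
    simp only [pvSp]
    split_ifs
    · simp
    · cases h : pvSp rest <;> simp

theorem pvGo_eq (fuel : Nat) : ∀ (l cur : List Char) (acc : List (List Char)),
    l.length < fuel →
    PySem.Chars.splitOn.go [' '] fuel l cur acc =
      acc.reverse ++
        (match pvSp l with
         | [] => []
         | w :: ws => (cur.reverse ++ w) :: ws) := by
  induction fuel with
  | zero => intro l cur acc h; omega
  | succ f ih =>
    intro l cur acc h
    cases l with
    | nil => simp [PySem.Chars.splitOn.go, pvSp]
    | cons c rest =>
      by_cases hc : c = ' '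
      · subst hc
        have : PySem.Chars.splitOn.go [' '] (f+1) (' ' :: rest) cur acc =
            PySem.Chars.splitOn.go [' '] f rest [] (cur.reverse :: acc) := by
          simp [PySem.Chars.splitOn.go, List.isPrefixOf]
        rw [this, ih rest [] (cur.reverse :: acc) (by simp at h; omega)]
        have hne := pvSp_ne_nil rest
        cases hsp : pvSp rest with
        | nil => exact absurd hsp hne
        | cons w ws => simp [pvSp, hsp]
      · have : PySem.Chars.splitOn.go [' '] (f+1) (c :: rest) cur acc =
            PySem.Chars.splitOn.go [' '] f rest (c :: cur) acc := by
          simp [PySem.Chars.splitOn.go, List.isPrefixOf, Ne.symm hc]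
        rw [this, ih rest (c :: cur) acc (by simp at h; omega)]
        have hne := pvSp_ne_nil rest
        cases hsp : pvSp rest with
        | nil => exact absurd hsp hne
        | cons w ws => simp [pvSp, hc, hsp]

theorem pvSplitOn_eq (cs : List Char) :
    PySem.Chars.splitOn cs [' '] = pvSp cs := by
  unfold PySem.Chars.splitOn
  rw [pvGo_eq (cs.length + 1) cs [] [] (by omega)]
  have hne := pvSp_ne_nil cs
  cases hsp : pvSp cs with
  | nil => exact absurd hsp hne
  | cons w ws => simp

theorem pvMk_cons (c : Char) (w : List Char) :
    String.ofList (c :: w) = c.toString ++ String.ofList w := by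
  apply String.toList_injective; simp [Char.toString]

theorem pvPush_append (last : String) (c : Char) (s : String) :
    last.push c ++ s = last ++ (c.toString ++ s) := by
  apply String.toList_injective; simp [Char.toString]

/-- A's enumerate loop, for start index ≥ 1, just appends " "-prefixed words. -/
theorem pvEnumFold (ws : List String) : ∀ (k : Int) (p0 : List String), 1 ≤ k →
    (PySem.List.enumerate ws k).foldl
        (fun parts iw => parts ++ [(if iw.1 > 0 then " " else "") ++ iw.2]) p0 =
      p0 ++ ws.map (fun w => " " ++ w) := by
  induction ws with
  | nil => intro k p0 _; simp [PySem.List.enumerate]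
  | cons w ws ih =>
    intro k p0 hk
    have : (k > 0) = True := by simp; omega
    simp only [PySem.List.enumerate, List.foldl, this, if_true]
    rw [ih (k + 1) _ (by omega)]
    simp

/-- B's fold with the current piece made explicit. -/
theorem pvBFold (cs : List Char) : ∀ (done : List String) (last : String),
    cs.foldl
        (fun parts c =>
          if c = ' ' then parts ++ [" "]
          else parts.dropLast ++ [parts.getLast! ++ c.toString])
        (done ++ [last]) =
      done ++
        (match pvSp cs with
         | [] => []
         | w :: ws => (last ++ String.ofList w) :: ws.map (fun w => " " ++ String.ofList w)) := by
  induction cs with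
  | nil => intro done last; simp [pvSp]
  | cons c rest ih =>
    intro done last
    by_cases hc : c = ' '
    · subst hc
      rw [List.foldl_cons, if_pos rfl, ih (done ++ [last]) " "]
      have hne := pvSp_ne_nil rest
      cases hsp : pvSp rest with
      | nil => exact absurd hsp hne
      | cons w ws => simp [pvSp, hsp]
    · rw [List.foldl_cons, if_neg hc]
      have h1 : (done ++ [last]).dropLast = done := by simp
      have h2 : (done ++ [last]).getLast! = last := by
        simp [List.getLast!_eq_getLast?_getD]
      rw [h1, h2, ih done (last ++ c.toString)]
      have hne := pvSp_ne_nil rest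
      cases hsp : pvSp rest with
      | nil => exact absurd hsp hne
      | cons w ws => simp [pvSp, hc, hsp, pvMk_cons, pvPush_append]

-- ===== VERDICT (by name: the statement is the Claim_ definition above) =====
theorem token_deltas_py_spec : Claim_equal_token_deltas_py := by
  intro answer _
  unfold Spec_token_deltas_py token_deltas_py token_deltas_py_alt
  by_cases hmt : answer = ""
  · simp [hmt]
  · simp only [if_neg hmt]
    have hsplit : (PySem.Str.split? answer " ").getD [] =
        (pvSp answer.toList).map String.ofList := by
      simp [PySem.Str.split?, PySem.Chars.split?]
      rw [pvSplitOn_eq]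
    rw [hsplit]
    have hne := pvSp_ne_nil answer.toList
    cases hsp : pvSp answer.toList with
    | nil => exact absurd hsp hne
    | cons w ws =>
      -- A side
      simp only [List.map_cons, PySem.List.enumerate, List.foldl, gt_iff_lt,
        lt_self_iff_false, if_false]
      rw [pvEnumFold (ws.map String.ofList) (0 + 1) _ (by omega)]
      -- B side
      rw [show ([""] : List String) = [] ++ [""] from rfl, pvBFold answer.toList [] "", hsp]
      simp
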